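-- pv_equiv track=rewrite | github.com/JoeOvenden/ProjectEuler | helpers/helpers.py | get_triangle_numbers
-- ===== SOURCE A (Python) =====
-- def get_triangle_numbers(x):
--     #returns all triangle numbers <= x
--     triangle_numbers = []
--     triangle_number = 1
--     n = 1
--     while n <= x:
--         triangle_numbers.append(triangle_number)
--         n += 1
--         triangle_number += n
--     return triangle_numbers
-- ===== SOURCE B (Python) =====
-- def get_triangle_numbers(x):
--     # first x triangle numbers, each from the closed form T_k = k*(k+1)//2
--     return [k * (k + 1) // 2 for k in range(1, x + 1)]
-- ===== Notes on version B (the rewrite author's own statement) =====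
-- stated objective: simpler
-- what changed: Replaces the running-accumulator while loop with a one-line comprehension computing each term from the closed form k*(k+1)//2.
import Mathlib
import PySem

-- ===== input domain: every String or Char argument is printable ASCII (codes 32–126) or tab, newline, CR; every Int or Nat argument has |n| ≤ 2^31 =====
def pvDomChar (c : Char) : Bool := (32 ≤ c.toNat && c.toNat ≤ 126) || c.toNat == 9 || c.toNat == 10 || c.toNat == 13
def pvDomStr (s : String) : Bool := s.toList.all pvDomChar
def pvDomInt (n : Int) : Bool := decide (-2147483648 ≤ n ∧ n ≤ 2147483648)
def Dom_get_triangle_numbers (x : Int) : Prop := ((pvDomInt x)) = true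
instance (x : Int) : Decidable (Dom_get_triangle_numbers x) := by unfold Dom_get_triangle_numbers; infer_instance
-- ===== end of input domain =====

-- B replaces A's running-sum accumulator loop with a comprehension using the closed form k*(k+1)//2 (simpler).

-- ===== PORT A =====
-- while n <= x: append triangle_number; n += 1; triangle_number += n
def getTriLoop (x tn n : Int) (acc : List Int) : List Int :=
  if n ≤ x then getTriLoop x (tn + (n + 1)) (n + 1) (acc ++ [tn]) else acc
termination_by (x + 1 - n).toNat
decreasing_by omega

def get_triangle_numbers (x : Int) : List Int := getTriLoop x 1 1 []

-- ===== PORT B =====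
-- [k*(k+1)//2 for k in range(1, x+1)]
def get_triangle_numbers_alt (x : Int) : List Int :=
  (PySem.List.pyRange 1 (x + 1) 1).map (fun k => PySem.Int.floordiv (k * (k + 1)) 2)

-- ===== PRECONDITION & SPEC =====
def Spec_get_triangle_numbers (x : Int) (out : List Int) : Prop := out = get_triangle_numbers_alt x
instance (x : Int) (out : List Int) : Decidable (Spec_get_triangle_numbers x out) := by unfold Spec_get_triangle_numbers; infer_instance

-- ===== CLAIM (what is proved, stated in full; the proofs are below) =====
def Claim_equal_get_triangle_numbers : Prop := ∀ (x : Int), Dom_get_triangle_numbers x → Spec_get_triangle_numbers x (get_triangle_numbers x)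

-- ===== LEMMAS AND PROOFS =====
theorem triClosed (n : Int) : PySem.Int.floordiv (n * (n + 1)) 2 = n * (n + 1) / 2 :=
  PySem.Int.floordiv_eq_ediv_of_pos (by omega)

theorem getTriLoop_eq (x : Int) : ∀ (fuel : Nat) (tn n : Int) (acc : List Int), (x + 1 - n).toNat ≤ fuel → 0 < n → 2 * tn = n * (n + 1) →
    getTriLoop x tn n acc = acc ++ (PySem.List.pyRange n (x + 1) 1).map (fun k => PySem.Int.floordiv (k * (k + 1)) 2) := by
  intro fuel
  induction fuel with
  | zero =>
    intro tn n acc hf hn hinv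
    rw [getTriLoop, if_neg (by omega)]
    have : PySem.List.pyRange n (x + 1) 1 = [] := by
      simp [PySem.List.pyRange_one]; omega
    simp [this]
  | succ m ih =>
    intro tn n acc hf hn hinv
    rw [getTriLoop]
    split_ifs with h
    · rw [PySem.List.pyRange_one_cons (by omega : n < x + 1),
        ih (tn + (n + 1)) (n + 1) (acc ++ [tn]) (by omega) (by omega) (by nlinarith)]
      simp only [List.map_cons, List.append_assoc, List.singleton_append]
      rw [triClosed n]
      congr 2
      omega
    · have : PySem.List.pyRange n (x + 1) 1 = [] := by
        simp [PySem.List.pyRange_one]; omega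
      simp [this]

-- ===== VERDICT (by name: the statement is the Claim_ definition above) =====
theorem get_triangle_numbers_spec : Claim_equal_get_triangle_numbers := by
  intro x _
  show get_triangle_numbers x = get_triangle_numbers_alt x
  rw [get_triangle_numbers, getTriLoop_eq x (x+1-1).toNat 1 1 [] (by omega) (by omega) (by ring)]
  rfl
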